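-- pv_equiv track=rewrite | github.com/Hptd/number-To-chinese-word | number_to_chinese.py | four_split
-- ===== SOURCE A (Python) =====
-- def four_split(number):  # 拆分函数，将整数字符串拆分成[亿，万，仟]的list
--     remainder = len(number) % 4  # 对4取余
--     number_split = []  # 定义一个空列表存放拆分后的结果
--     remaining_numbers_length = len(number) - 1  # 把数字的长度-1后赋给remaining_numbers_length
--     if remainder > 0:  # 如果余数大于0
--         number_split.append(number[0:remainder])  # 先把余数个数字拆分为一组
--     k = remainder  # 把余数赋给k
--     while k <= remaining_numbers_length:  # 遍历余下的数字
--         number_split.append(number[k:k + 4])  # 在已拆分的余数个数字后面按4位拆分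
--         k += 4  # 每拆分一次，k值加上4
--     return number_split  # 以列表形式返回拆分后的结果
-- ===== SOURCE B (Python) =====
-- def four_split(number):
--     rev = number[::-1]
--     chunks = [rev[i:i + 4][::-1] for i in range(0, len(rev), 4)]
--     chunks.reverse()
--     return chunks
-- ===== Notes on version B (the rewrite author's own statement) =====
-- stated objective: alternative
-- what changed: B chunks from the right: it reverses the string, cuts the reversal into 4-char pieces with one comprehension over range(0, len, 4), un-reverses each piece and reverses the piece list, removing A's front-remainder special case and while-loop.
import Mathlib
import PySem

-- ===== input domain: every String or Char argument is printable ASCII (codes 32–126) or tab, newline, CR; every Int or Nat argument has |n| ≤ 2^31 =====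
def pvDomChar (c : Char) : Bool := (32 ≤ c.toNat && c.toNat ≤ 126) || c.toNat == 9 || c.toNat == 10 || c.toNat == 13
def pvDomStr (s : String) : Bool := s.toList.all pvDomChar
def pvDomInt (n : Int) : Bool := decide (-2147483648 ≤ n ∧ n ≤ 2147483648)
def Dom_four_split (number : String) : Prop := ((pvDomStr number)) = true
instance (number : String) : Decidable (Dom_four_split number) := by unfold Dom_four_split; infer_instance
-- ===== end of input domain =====

-- B chunks from the right (reverse the string, cut the reversal into 4s in one pass, un-reverse),
-- removing A's front-remainder special case and while-loop; alternative decomposition, same cost.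

-- ===== PORT A =====
-- A's while loop: append number[k:k+4] while k <= remaining_numbers_length, k += 4

def fourSplitLoop (number : String) (remaining : Int) (k : Int) (acc : List String) : List String :=
  if k ≤ remaining then
    fourSplitLoop number remaining (k + 4) (acc ++ [PySem.Str.slice number (some k) (some (k + 4))])
  else acc
termination_by (remaining + 1 - k).toNat
decreasing_by omega

def four_split (number : String) : List String :=
  let remainder := PySem.Int.mod (PySem.Str.len number) 4
  let number_split : List String := []
  let remaining_numbers_length := PySem.Str.len number - 1
  let number_split :=
    if remainder > 0 then number_split ++ [PySem.Str.slice number (some 0) (some remainder)]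
    else number_split
  fourSplitLoop number remaining_numbers_length remainder number_split


-- ===== PORT B =====

def four_split_alt (number : String) : List String :=
  let rev := (PySem.Str.slice? number none none (-1)).getD ""
  let chunks := (PySem.List.pyRange 0 (PySem.Str.len rev) 4).map
    (fun i => (PySem.Str.slice? (PySem.Str.slice rev (some i) (some (i + 4))) none none (-1)).getD "")
  chunks.reverse


-- ===== PRECONDITION & SPEC =====
def Spec_four_split (number : String) (out : List String) : Prop := out = four_split_alt number
instance (number : String) (out : List String) : Decidable (Spec_four_split number out) := by unfold Spec_four_split; infer_instance

-- ===== CLAIM (what is proved, stated in full; the proofs are below) =====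
def Claim_equal_four_split : Prop := ∀ (number : String), Dom_four_split number → Spec_four_split number (four_split number)

-- ===== LEMMAS AND PROOFS =====

-- A's groups, on the character-list level

def chunksA (cs : List Char) : List (List Char) :=
  (if 0 < cs.length % 4 then [cs.take (cs.length % 4)] else []) ++
    (List.range (cs.length / 4)).map (fun k => (cs.drop (cs.length % 4 + 4 * k)).take 4)


-- B's groups, on the character-list level

def chunksB (cs : List Char) : List (List Char) :=
  ((List.range ((cs.length + 3) / 4)).map
    (fun k => ((cs.reverse.drop (4 * k)).take 4).reverse)).reverse


lemma pyRange4_natRange (a b : Nat) :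
    PySem.List.pyRange (a : Int) (b : Int) 4 =
      (List.range ((b - a + 3) / 4)).map (fun k => ((a + 4 * k : Nat) : Int)) := by
  rw [PySem.List.pyRange_of_pos _ _ (by norm_num)]
  by_cases h : (a:Int) < (b:Int)
  · rw [if_pos h]
    have hab : a < b := by exact_mod_cast h
    have hcount : (((b:Int) - a + 4 - 1) / 4).toNat = (b - a + 3) / 4 := by
      have : ((b:Int) - a + 4 - 1) = ((b - a + 3 : Nat) : Int) := by push_cast; omega
      rw [this]
      have h4 : (4:Int) = ((4:Nat):Int) := by norm_num
      rw [h4, Int.ofNat_ediv_ofNat]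
      exact Int.toNat_natCast _
    rw [hcount]
    apply List.map_congr_left
    intro k _
    push_cast; ring
  · rw [if_neg h]
    have : (b - a + 3) / 4 = 0 := by omega
    rw [this]
    simp


lemma pyRange4_nil {a b : Int} (h : b ≤ a) : PySem.List.pyRange a b 4 = [] := by
  rw [PySem.List.pyRange_of_pos _ _ (by norm_num), if_neg (by omega)]
  simp


lemma pyRange4_cons {a b : Int} (h : a < b) :
    PySem.List.pyRange a b 4 = a :: PySem.List.pyRange (a + 4) b 4 := by
  rw [PySem.List.pyRange_of_pos _ _ (by norm_num), PySem.List.pyRange_of_pos _ _ (by norm_num),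
    if_pos h]
  have hc : ((b - a + 4 - 1) / 4).toNat =
      (if a + 4 < b then ((b - (a + 4) + 4 - 1) / 4).toNat else 0) + 1 := by
    by_cases h2 : a + 4 < b
    · rw [if_pos h2]; omega
    · rw [if_neg h2]; omega
  rw [hc, List.range_succ_eq_map]
  simp only [List.map_cons, List.map_map]
  refine congrArg₂ _ (by norm_num) ?_
  apply List.map_congr_left
  intro k _
  simp [Nat.succ_eq_add_one]
  ring


lemma loop_eq (s : String) (rem : Int) : ∀ (m : Nat) (k : Int) (acc : List String),
    (rem + 1 - k).toNat = m →
    fourSplitLoop s rem k acc =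
      acc ++ (PySem.List.pyRange k (rem + 1) 4).map
        (fun i => PySem.Str.slice s (some i) (some (i + 4))) := by
  intro m
  induction m using Nat.strong_induction_on with
  | _ m ih =>
    intro k acc hm
    rw [fourSplitLoop]
    by_cases hk : k ≤ rem
    · rw [if_pos hk, pyRange4_cons (show k < rem + 1 by omega),
        ih ((rem + 1 - (k + 4)).toNat) (by omega) (k + 4) _ rfl]
      simp
    · rw [if_neg hk, pyRange4_nil (by omega)]
      simp


lemma slice_take4 (s : String) (i : Nat) :
    PySem.Str.slice s (some (i : Int)) (some ((i : Int) + 4)) = String.ofList ((s.toList.drop i).take 4) := by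
  have h4 : (i : Int) + 4 = ((i + 4 : Nat) : Int) := by push_cast; ring
  rw [PySem.Str.slice, h4]
  unfold PySem.Chars.slice
  rw [PySem.List.slice_natCast]
  have h5 : i + 4 - i = 4 := by omega
  rw [h5]


lemma A_eq (s : String) : four_split s = (chunksA s.toList).map String.ofList := by
  unfold four_split chunksA
  rw [PySem.Str.len_eq]
  have hmod : PySem.Int.mod (s.toList.length : Int) 4 = ((s.toList.length % 4 : Nat) : Int) := by
    rw [PySem.Int.mod_eq_emod_of_pos (by norm_num : (0:Int) < 4)]
    push_cast
    rfl
  rw [hmod, loop_eq s ((s.toList.length : Int) - 1) _ _ _ rfl]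
  have h1 : (s.toList.length : Int) - 1 + 1 = (s.toList.length : Int) := by ring
  rw [h1, pyRange4_natRange]
  have h2 : (s.toList.length - s.toList.length % 4 + 3) / 4 = s.toList.length / 4 := by omega
  rw [h2, List.map_map, List.map_append, List.map_map]
  simp only [gt_iff_lt, Nat.cast_pos]
  congr 1
  · split_ifs with ha
    · simp only [List.nil_append, List.map_cons, List.map_nil, List.cons.injEq, and_true]
      rw [PySem.Str.slice]
      unfold PySem.Chars.slice
      rw [PySem.List.slice_zero_start, PySem.List.slice_to_natCast]
    · rfl
  · apply List.map_congr_left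
    intro k _
    simp only [Function.comp]
    exact slice_take4 s _


lemma pyRange4_natRange0 (b : Nat) :
    PySem.List.pyRange 0 (b : Int) 4 =
      (List.range ((b + 3) / 4)).map (fun k => ((4 * k : Nat) : Int)) := by
  rw [show (0:Int) = ((0:Nat):Int) from rfl, pyRange4_natRange]
  simp


lemma B_eq (s : String) : four_split_alt s = (chunksB s.toList).map String.ofList := by
  unfold four_split_alt chunksB
  rw [PySem.Str.slice?_none_none_neg_one]
  simp only [Option.getD_some]
  rw [PySem.Str.len_eq, String.toList_ofList, List.length_reverse, pyRange4_natRange0,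
    List.map_map, List.map_reverse, List.map_map]
  refine congrArg List.reverse ?_
  apply List.map_congr_left
  intro k _
  simp only [Function.comp]
  rw [slice_take4, String.toList_ofList, PySem.Str.slice?_none_none_neg_one]
  simp [String.toList_ofList]


lemma chunks_eq (N : Nat) : ∀ cs : List Char, cs.length ≤ N → chunksA cs = chunksB cs := by
  induction N with
  | zero =>
    intro cs h
    have : cs = [] := List.eq_nil_of_length_eq_zero (by omega)
    subst this
    rfl
  | succ n ih =>
    intro cs h
    by_cases hle : cs.length ≤ n
    · exact ih cs hle
    have hL : cs.length = n + 1 := by omega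
    by_cases h4 : cs.length ≤ 4
    · -- 1 ≤ length ≤ 4 : both sides are [cs]
      unfold chunksA chunksB
      have hq : (cs.length + 3) / 4 = 1 := by omega
      rw [hq]
      have hrev : cs.reverse.take 4 = cs.reverse := List.take_of_length_le (by simpa using h4)
      have hone : ((List.range 1).map
          (fun k => ((cs.reverse.drop (4 * k)).take 4).reverse)).reverse = [cs] := by
        simp [List.range_succ, hrev]
      rw [hone]
      by_cases hF : cs.length = 4
      · rw [hF]
        norm_num [List.range_succ]
        omega
      · have hr : cs.length % 4 = cs.length := by omega
        have hd : cs.length / 4 = 0 := by omega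
        rw [hr, hd, if_pos (by omega)]
        simp [List.take_of_length_le]
    · -- length ≥ 5 : peel the last 4 characters
      set L := cs.length with hLdef
      set cs' := cs.take (L - 4) with hcs'
      have hlen' : cs'.length = L - 4 := by
        rw [hcs', List.length_take]; omega
      have hih := ih cs' (by omega)
      have hA : chunksA cs = chunksA cs' ++ [cs.drop (L - 4)] := by
        unfold chunksA
        rw [hlen', ← hLdef, show (L - 4) % 4 = L % 4 from by omega,
          show (L - 4) / 4 = L / 4 - 1 from by omega,
          show L / 4 = (L / 4 - 1) + 1 from by omega, List.range_succ, List.map_append]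
        rw [List.append_assoc]
        congr 1
        · split_ifs with hp
          · congr 1
            rw [hcs', List.take_take, Nat.min_eq_left (by omega)]
          · rfl
        congr 1
        · apply List.map_congr_left
          intro k hk
          rw [List.mem_range] at hk
          rw [hcs', List.drop_take, List.take_take, Nat.min_eq_left (by omega)]
        · simp only [List.map_cons, List.map_nil]
          congr 1
          rw [show L % 4 + 4 * (L / 4 - 1) = L - 4 by omega]
          exact List.take_of_length_le (by rw [List.length_drop]; omega)
      have hB : chunksB cs = chunksB cs' ++ [cs.drop (L - 4)] := by
        unfold chunksB
        rw [hlen']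
        have hq4 : (L - 4 + 3) / 4 = (L + 3) / 4 - 1 := by omega
        rw [hq4, show (L + 3) / 4 = ((L + 3) / 4 - 1) + 1 from by omega,
          List.range_succ_eq_map, List.map_cons, List.reverse_cons, List.map_map]
        congr 1
        · refine congrArg List.reverse ?_
          apply List.map_congr_left
          intro k hk
          simp only [Function.comp, Nat.succ_eq_add_one]
          have e4 : cs.reverse.drop 4 = cs'.reverse := by
            rw [List.drop_reverse, ← hLdef, ← hcs']
          rw [show 4 * (k + 1) = 4 + 4 * k from by ring, ← List.drop_drop, e4]
        · congr 1
          rw [List.drop_zero, List.take_reverse, List.reverse_reverse]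
      rw [hA, hB, hih]


-- ===== VERDICT (by name: the statement is the Claim_ definition above) =====
theorem four_split_spec : Claim_equal_four_split := by
  intro number _
  unfold Spec_four_split
  rw [A_eq, B_eq, chunks_eq number.toList.length number.toList le_rfl]
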